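-- pv_equiv track=rewrite | github.com/alysekwok/cs1301 | Homework/HW06.py | courseRosters
-- ===== SOURCE A (Python) =====
-- def courseRosters(students):
--     roster = {}
--     for (name, major, schedule) in students:
--         for course in schedule:
--             if course not in roster:
--                 roster[course] = {}
--             if major not in roster[course]:
--                 roster[course][major] = []
--             if name not in roster[course][major]:
--                 roster[course][major].append(name)
--     return roster
-- ===== SOURCE B (Python) =====
-- def courseRosters(students):
--     triples = [(course, major, name)
--                for (name, major, schedule) in students
--                for course in schedule]
--     courses = list(dict.fromkeys(c for (c, _, _) in triples))
--     return {c: {m: list(dict.fromkeys(n for (c2, m2, n) in triples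
--                                       if c2 == c and m2 == m))
--                 for m in dict.fromkeys(m2 for (c2, m2, _) in triples if c2 == c)}
--             for c in courses}
-- ===== Notes on version B (the rewrite author's own statement) =====
-- stated objective: alternative
-- what changed: B replaces A's single mutation loop over a nested dict by a flatten-then-group-by algorithm: it first materialises the flat (course, major, name) triple list, then constructs the roster non-mutatingly with nested comprehensions that dedup the course/major key streams and gather each name list by filtering the triple list.
import Mathlib
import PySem

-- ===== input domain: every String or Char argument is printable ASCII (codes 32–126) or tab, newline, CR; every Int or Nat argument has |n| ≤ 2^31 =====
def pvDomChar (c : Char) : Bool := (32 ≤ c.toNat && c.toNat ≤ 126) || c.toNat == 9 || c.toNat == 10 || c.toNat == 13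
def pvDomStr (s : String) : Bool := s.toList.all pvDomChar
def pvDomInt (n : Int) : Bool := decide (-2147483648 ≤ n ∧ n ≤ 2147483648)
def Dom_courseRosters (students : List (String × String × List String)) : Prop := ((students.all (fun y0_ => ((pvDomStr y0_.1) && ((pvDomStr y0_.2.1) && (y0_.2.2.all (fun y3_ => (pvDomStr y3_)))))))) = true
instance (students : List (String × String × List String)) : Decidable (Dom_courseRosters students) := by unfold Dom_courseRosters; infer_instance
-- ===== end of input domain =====

-- B replaces A's mutation loop over a nested dict by flatten-then-group-by: build the flat
-- (course, major, name) triple list once, then assemble the roster by filtering it (alternative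
-- algorithm, same return value; not faster).

-- ===== PORT A =====
-- one iteration of A's inner loop body (roster mutation modelled by read-modify-write)
def pvStepA (r : PySem.Dict String (PySem.Dict String (List String)))
    (name major course : String) : PySem.Dict String (PySem.Dict String (List String)) :=
  let r1 := if !(r.contains course) then r.insert course PySem.Dict.empty else r
  let i1 := r1.getD course PySem.Dict.empty
  let r2 := if !(i1.contains major) then r1.insert course (i1.insert major []) else r1
  let i2 := r2.getD course PySem.Dict.empty
  let names := i2.getD major []
  if !(names.contains name) then r2.insert course (i2.insert major (names ++ [name])) else r2

def courseRosters (students : List (String × String × List String)) : List (String × List (String × List String)) :=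
  ((students.foldl (fun r s => s.2.2.foldl (fun r course => pvStepA r s.1 s.2.1 course) r)
      PySem.Dict.empty).items).map (fun p => (p.1, p.2.items))

-- ===== PORT B =====
-- transliteration of Source B: flat triple list, then nested group-by comprehensions
def courseRosters_alt (students : List (String × String × List String)) : List (String × List (String × List String)) :=
  let triples := students.flatMap (fun s => s.2.2.map (fun course => (course, s.2.1, s.1)))
  let courses := PySem.List.dedup (triples.map (fun t => t.1))
  courses.map (fun c =>
    (c, (PySem.List.dedup ((triples.filter (fun t => t.1 == c)).map (fun t => t.2.1))).map
        (fun m => (m, PySem.List.dedup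
          ((triples.filter (fun t => t.1 == c && t.2.1 == m)).map (fun t => t.2.2))))))

-- ===== PRECONDITION & SPEC =====
def Spec_courseRosters (students : List (String × String × List String)) (out : List (String × List (String × List String))) : Prop := out = courseRosters_alt students
instance (students : List (String × String × List String)) (out : List (String × List (String × List String))) : Decidable (Spec_courseRosters students out) := by unfold Spec_courseRosters; infer_instance

-- ===== CLAIM (what is proved, stated in full; the proofs are below) =====
def Claim_equal_courseRosters : Prop := ∀ (students : List (String × String × List String)), Dom_courseRosters students → Spec_courseRosters students (courseRosters students)

-- ===== LEMMAS AND PROOFS =====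

-- the flat (course, major, name) event stream of the input
def pvTriples (students : List (String × String × List String)) : List (String × String × String) :=
  students.flatMap (fun s => s.2.2.map (fun course => (course, s.2.1, s.1)))

def pvCourses (ts : List (String × String × String)) : List String :=
  PySem.List.dedup (ts.map (fun t => t.1))

def pvMajors (ts : List (String × String × String)) (c : String) : List String :=
  PySem.List.dedup ((ts.filter (fun t => t.1 == c)).map (fun t => t.2.1))

def pvNames (ts : List (String × String × String)) (c m : String) : List String :=
  PySem.List.dedup ((ts.filter (fun t => t.1 == c && t.2.1 == m)).map (fun t => t.2.2))

-- a dict tabulating a function over a key list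
def pvTab {ν : Type} (ds : List String) (f : String → ν) : PySem.Dict String ν :=
  PySem.Dict.mk (ds.map (fun k => (k, f k)))

-- the group-by roster as a nested dict
def pvRoster (ts : List (String × String × String)) : PySem.Dict String (PySem.Dict String (List String)) :=
  pvTab (pvCourses ts) (fun c => pvTab (pvMajors ts c) (pvNames ts c))

theorem pvTab_congr {ν : Type} (ds : List String) (f g : String → ν)
    (h : ∀ k ∈ ds, f k = g k) : pvTab ds f = pvTab ds g := by
  unfold pvTab
  congr 1
  exact List.map_congr_left (fun k hk => by rw [h k hk])

theorem pvTab_contains {ν : Type} (ds : List String) (f : String → ν) (c : String) :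
    (pvTab ds f).contains c = ds.any (fun k => k == c) := by
  simp [pvTab, PySem.Dict.contains, List.any_map, Function.comp_def]

theorem pvTab_getD {ν : Type} (ds : List String) (f : String → ν) (c : String) (d : ν)
    (hc : c ∈ ds) : (pvTab ds f).getD c d = f c := by
  induction ds with
  | nil => simp at hc
  | cons k ds ih =>
    by_cases hk : k = c
    · subst hk
      simp [pvTab, PySem.Dict.getD, PySem.Dict.get?]
    · have hc' : c ∈ ds := by
        rcases List.mem_cons.mp hc with h | h
        · exact absurd h.symm hk
        · exact h
      have := ih hc'
      simp only [pvTab, List.map_cons, PySem.Dict.getD, PySem.Dict.get?, List.find?_cons] at this ⊢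
      rw [show ((k, f k).1 == c) = false by simpa using hk]
      exact this

theorem pvTab_insert_mem {ν : Type} (ds : List String) (f g : String → ν) (c : String) (v : ν)
    (hc : c ∈ ds) (hfg : ∀ k ∈ ds, k ≠ c → f k = g k) (hv : v = g c) :
    (pvTab ds f).insert c v = pvTab ds g := by
  have hcont : (pvTab ds f).contains c = true := by
    rw [pvTab_contains]
    exact List.any_eq_true.mpr ⟨c, hc, by simp⟩
  apply PySem.Dict.ext
  rw [PySem.Dict.items_insert, hcont, if_pos rfl]
  show (ds.map (fun k => (k, f k))).map _ = ds.map (fun k => (k, g k))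
  rw [List.map_map]
  apply List.map_congr_left
  intro k hk
  by_cases hkc : k = c
  · simp only [Function.comp_def]
    rw [show (((k, f k) : String × ν).1 == c) = true by simpa using hkc]
    simp [hv, hkc]
  · simp only [Function.comp_def]
    rw [show (((k, f k) : String × ν).1 == c) = false by simpa using hkc]
    simp [hfg k hk hkc]

theorem pvTab_insert_not_mem {ν : Type} (ds : List String) (f g : String → ν) (c : String) (v : ν)
    (hc : c ∉ ds) (hfg : ∀ k ∈ ds, f k = g k) (hv : v = g c) :
    (pvTab ds f).insert c v = pvTab (ds ++ [c]) g := by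
  have hcont : (pvTab ds f).contains c = false := by
    rw [pvTab_contains]
    rw [List.any_eq_false]
    intro k hk he
    exact hc ((beq_iff_eq.mp he) ▸ hk)
  apply PySem.Dict.ext
  rw [PySem.Dict.items_insert, hcont, if_neg (by simp)]
  show ds.map (fun k => (k, f k)) ++ [(c, v)] = (ds ++ [c]).map (fun k => (k, g k))
  rw [List.map_append]
  congr 1
  · exact List.map_congr_left (fun k hk => by rw [hfg k hk])
  · simp [hv]

-- dedup of a snoc
theorem pvDedup_snoc_mem {α : Type} [DecidableEq α] (xs : List α) (x : α) (h : x ∈ xs) :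
    PySem.List.dedup (xs ++ [x]) = PySem.List.dedup xs := by
  simp only [PySem.List.dedup_eq_ofList, PySem.Set.ofList_append_singleton]
  exact PySem.Set.add_of_mem ((PySem.Set.mem_ofList xs x).mpr h)

theorem pvDedup_snoc_not_mem {α : Type} [DecidableEq α] (xs : List α) (x : α) (h : x ∉ xs) :
    PySem.List.dedup (xs ++ [x]) = PySem.List.dedup xs ++ [x] := by
  simp only [PySem.List.dedup_eq_ofList, PySem.Set.ofList_append_singleton]
  exact PySem.Set.add_of_not_mem (fun hm => h ((PySem.Set.mem_ofList xs x).mp hm))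

-- effect of one extra triple (c, m, n) on the three group-by components
theorem pvCourses_snoc (ts : List (String × String × String)) (t : String × String × String) :
    pvCourses (ts ++ [t]) =
      if t.1 ∈ pvCourses ts then pvCourses ts else pvCourses ts ++ [t.1] := by
  unfold pvCourses
  rw [List.map_append]
  by_cases h : t.1 ∈ ts.map (fun t => t.1)
  · rw [if_pos (by simpa [pvCourses, PySem.List.mem_dedup] using h)]
    exact pvDedup_snoc_mem _ _ h
  · rw [if_neg (by simpa [pvCourses, PySem.List.mem_dedup] using h)]
    exact pvDedup_snoc_not_mem _ _ h

theorem pvMajors_snoc_ne (ts : List (String × String × String)) (t : String × String × String)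
    (c : String) (h : c ≠ t.1) : pvMajors (ts ++ [t]) c = pvMajors ts c := by
  unfold pvMajors
  rw [List.filter_append]
  have : List.filter (fun x => x.1 == c) [t] = [] := by
    simp [List.filter, show (t.1 == c) = false by simpa using h.symm]
  rw [this, List.append_nil]

theorem pvMajors_snoc_self (ts : List (String × String × String)) (t : String × String × String) :
    pvMajors (ts ++ [t]) t.1 =
      if t.2.1 ∈ pvMajors ts t.1 then pvMajors ts t.1
      else pvMajors ts t.1 ++ [t.2.1] := by
  unfold pvMajors
  rw [List.filter_append]
  have : List.filter (fun x => x.1 == t.1) [t] = [t] := by simp [List.filter]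
  rw [this, List.map_append]
  by_cases h : t.2.1 ∈ (ts.filter (fun x => x.1 == t.1)).map (fun x => x.2.1)
  · rw [if_pos (by simpa [pvMajors, PySem.List.mem_dedup] using h)]
    exact pvDedup_snoc_mem _ _ h
  · rw [if_neg (by simpa [pvMajors, PySem.List.mem_dedup] using h)]
    exact pvDedup_snoc_not_mem _ _ h

theorem pvNames_snoc_ne (ts : List (String × String × String)) (t : String × String × String)
    (c m : String) (h : ¬(c = t.1 ∧ m = t.2.1)) : pvNames (ts ++ [t]) c m = pvNames ts c m := by
  unfold pvNames
  rw [List.filter_append]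
  have : List.filter (fun x => x.1 == c && x.2.1 == m) [t] = [] := by
    rcases (not_and_or.mp h) with h1 | h1
    · simp [List.filter, show (t.1 == c) = false by simpa using (fun he => h1 he.symm)]
    · simp [List.filter, show (t.2.1 == m) = false by simpa using (fun he => h1 he.symm)]
  rw [this, List.append_nil]

theorem pvNames_snoc_self (ts : List (String × String × String)) (t : String × String × String) :
    pvNames (ts ++ [t]) t.1 t.2.1 =
      if t.2.2 ∈ pvNames ts t.1 t.2.1 then pvNames ts t.1 t.2.1
      else pvNames ts t.1 t.2.1 ++ [t.2.2] := by
  unfold pvNames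
  rw [List.filter_append]
  have : List.filter (fun x => x.1 == t.1 && x.2.1 == t.2.1) [t] = [t] := by simp [List.filter]
  rw [this, List.map_append]
  by_cases h : t.2.2 ∈ (ts.filter (fun x => x.1 == t.1 && x.2.1 == t.2.1)).map (fun x => x.2.2)
  · rw [if_pos (by simpa [pvNames, PySem.List.mem_dedup] using h)]
    exact pvDedup_snoc_mem _ _ h
  · rw [if_neg (by simpa [pvNames, PySem.List.mem_dedup] using h)]
    exact pvDedup_snoc_not_mem _ _ h

-- if a course never occurs, its (course, major) filter is empty
theorem pvNames_of_not_major (ts : List (String × String × String)) (c m : String)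
    (h : m ∉ pvMajors ts c) : ts.filter (fun t => t.1 == c && t.2.1 == m) = [] := by
  rw [List.filter_eq_nil_iff]
  intro t ht hsat
  apply h
  simp only [Bool.and_eq_true, beq_iff_eq] at hsat
  simp only [pvMajors, PySem.List.mem_dedup]
  exact List.mem_map.mpr ⟨t, List.mem_filter.mpr ⟨ht, by simp [hsat.1]⟩, hsat.2⟩

theorem pvFilter_of_not_course (ts : List (String × String × String)) (c : String)
    (h : c ∉ pvCourses ts) : ts.filter (fun t => t.1 == c) = [] := by
  rw [List.filter_eq_nil_iff]
  intro t ht hsat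
  apply h
  simp only [beq_iff_eq] at hsat
  simp only [pvCourses, PySem.List.mem_dedup]
  exact List.mem_map.mpr ⟨t, ht, hsat⟩

-- membership tests on the group-by lists, phrased as Dict operations on pvTab
theorem pvTab_contains_iff {ν : Type} (ds : List String) (f : String → ν) (c : String) :
    (pvTab ds f).contains c = true ↔ c ∈ ds := by
  rw [pvTab_contains]
  constructor
  · intro h
    rcases List.any_eq_true.mp h with ⟨k, hk, he⟩
    exact (beq_iff_eq.mp he) ▸ hk
  · intro h
    exact List.any_eq_true.mpr ⟨c, h, by simp⟩

-- pvStepA reduced in each of the four scenarios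
theorem pvStepA_dup (r : PySem.Dict String (PySem.Dict String (List String)))
    (i : PySem.Dict String (List String)) (n m c : String)
    (hc : r.contains c = true) (hi : r.getD c PySem.Dict.empty = i)
    (hm : i.contains m = true) (hn : (i.getD m []).contains n = true) :
    pvStepA r n m c = r := by
  simp [pvStepA, hc, hi, hm]
  exact fun h => absurd (by simpa using hn) h

theorem pvStepA_newname (r : PySem.Dict String (PySem.Dict String (List String)))
    (i : PySem.Dict String (List String)) (n m c : String)
    (hc : r.contains c = true) (hi : r.getD c PySem.Dict.empty = i)
    (hm : i.contains m = true) (hn : (i.getD m []).contains n = false) :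
    pvStepA r n m c = r.insert c (i.insert m (i.getD m [] ++ [n])) := by
  simp [pvStepA, hc, hi, hm]
  exact fun h => absurd h (by simpa using hn)

theorem pvStepA_newmajor (r : PySem.Dict String (PySem.Dict String (List String)))
    (i : PySem.Dict String (List String)) (n m c : String)
    (hc : r.contains c = true) (hi : r.getD c PySem.Dict.empty = i)
    (hm : i.contains m = false) :
    pvStepA r n m c = r.insert c (i.insert m [n]) := by
  simp [pvStepA, hc, hi, hm, PySem.Dict.getD_insert_self, PySem.Dict.insert_insert_self]

theorem pvStepA_newcourse (r : PySem.Dict String (PySem.Dict String (List String)))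
    (n m c : String) (hc : r.contains c = false) :
    pvStepA r n m c = r.insert c (PySem.Dict.empty.insert m [n]) := by
  simp [pvStepA, hc, PySem.Dict.getD_insert_self, PySem.Dict.insert_insert_self]

-- the key step: one pvStepA on the group-by roster is one snoc on the triple stream
theorem pvStep_snoc (ts : List (String × String × String)) (t : String × String × String) :
    pvStepA (pvRoster ts) t.2.2 t.2.1 t.1 = pvRoster (ts ++ [t]) := by
  obtain ⟨c, m, n⟩ := t
  simp only at *
  by_cases hc : c ∈ pvCourses ts
  · -- course already present
    have hcont : (pvRoster ts).contains c = true := (pvTab_contains_iff _ _ c).mpr hc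
    have hinner : (pvRoster ts).getD c PySem.Dict.empty = pvTab (pvMajors ts c) (pvNames ts c) :=
      pvTab_getD _ _ c _ hc
    have hcourses : pvCourses (ts ++ [(c, m, n)]) = pvCourses ts := by
      rw [pvCourses_snoc]; simp [hc]
    have hInnerNe : ∀ c' ∈ pvCourses ts, c' ≠ c →
        pvTab (pvMajors ts c') (pvNames ts c') =
        pvTab (pvMajors (ts ++ [(c, m, n)]) c') (pvNames (ts ++ [(c, m, n)]) c') := by
      intro c' _ hne
      rw [pvMajors_snoc_ne ts (c, m, n) c' hne]
      exact pvTab_congr _ _ _ (fun m' _ =>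
        (pvNames_snoc_ne ts (c, m, n) c' m' (fun hp => hne hp.1)).symm)
    by_cases hm : m ∈ pvMajors ts c
    · -- major already present
      have hmcont : (pvTab (pvMajors ts c) (pvNames ts c)).contains m = true :=
        (pvTab_contains_iff _ _ m).mpr hm
      have hmajors : pvMajors (ts ++ [(c, m, n)]) c = pvMajors ts c := by
        rw [pvMajors_snoc_self]; simp [hm]
      have hnamesD : (pvTab (pvMajors ts c) (pvNames ts c)).getD m [] = pvNames ts c m :=
        pvTab_getD _ _ m _ hm
      by_cases hn : n ∈ pvNames ts c m
      · -- duplicate name: A leaves the roster unchanged; the snoc changes no component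
        have hnames : pvNames (ts ++ [(c, m, n)]) c m = pvNames ts c m := by
          rw [pvNames_snoc_self]; simp [hn]
        have : pvRoster (ts ++ [(c, m, n)]) = pvRoster ts := by
          unfold pvRoster
          rw [hcourses]
          apply pvTab_congr
          intro c' hc'
          by_cases hne : c' = c
          · rw [hne, hmajors]
            apply pvTab_congr
            intro m' hm'
            by_cases hme : m' = m
            · rw [hme]; exact hnames
            · exact pvNames_snoc_ne ts (c, m, n) c m' (fun hp => hme hp.2)
          · exact (hInnerNe c' hc' hne).symm
        rw [pvStepA_dup _ _ _ _ _ hcont hinner hmcont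
          (by rw [hnamesD]; simpa using hn)]
        exact this.symm
      · -- new name appended at the end of its list
        have hnames : pvNames (ts ++ [(c, m, n)]) c m = pvNames ts c m ++ [n] := by
          rw [pvNames_snoc_self]; simp [hn]
        rw [pvStepA_newname _ _ _ _ _ hcont hinner hmcont
          (by rw [hnamesD]; simpa using hn), hnamesD]
        unfold pvRoster
        rw [hcourses]
        apply pvTab_insert_mem _ _ _ _ _ hc (fun c' hc' hne => hInnerNe c' hc' hne)
        rw [hmajors]
        apply pvTab_insert_mem _ _ _ _ _ hm
        · intro m' _ hme
          exact (pvNames_snoc_ne ts (c, m, n) c m' (fun hp => hme hp.2)).symm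
        · exact hnames.symm
    · -- new major for an existing course
      have hmcont : (pvTab (pvMajors ts c) (pvNames ts c)).contains m = false := by
        rw [pvTab_contains]
        rw [List.any_eq_false]
        intro k hk he
        exact hm ((beq_iff_eq.mp he) ▸ hk)
      have hmajors : pvMajors (ts ++ [(c, m, n)]) c = pvMajors ts c ++ [m] := by
        rw [pvMajors_snoc_self]; simp [hm]
      have hraw : ts.filter (fun t => t.1 == c && t.2.1 == m) = [] :=
        pvNames_of_not_major ts c m hm
      have hnames : pvNames (ts ++ [(c, m, n)]) c m = [n] := by
        unfold pvNames
        rw [List.filter_append, hraw, List.nil_append]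
        simp only [List.filter, show (c == c && m == m) = true by simp, List.map_cons,
          List.map_nil, PySem.List.dedup_eq_ofList]
        exact PySem.Set.ofList_eq_self_of_nodup _ (by simp)
      rw [pvStepA_newmajor _ _ _ _ _ hcont hinner hmcont]
      unfold pvRoster
      rw [hcourses]
      apply pvTab_insert_mem _ _ _ _ _ hc (fun c' hc' hne => hInnerNe c' hc' hne)
      rw [hmajors]
      apply pvTab_insert_not_mem _ _ _ _ _ hm
      · intro m' hm'
        exact (pvNames_snoc_ne ts (c, m, n) c m' (fun hp =>
          hm ((show m' = m from hp.2) ▸ hm'))).symm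
      · exact hnames.symm
  · -- brand-new course
    have hcont : (pvRoster ts).contains c = false := by
      rw [pvRoster, pvTab_contains]
      rw [List.any_eq_false]
      intro k hk he
      exact hc ((beq_iff_eq.mp he) ▸ hk)
    have hcourses : pvCourses (ts ++ [(c, m, n)]) = pvCourses ts ++ [c] := by
      rw [pvCourses_snoc]; simp [hc]
    have hrawc : ts.filter (fun t => t.1 == c) = [] := pvFilter_of_not_course ts c hc
    have hmajors : pvMajors (ts ++ [(c, m, n)]) c = [m] := by
      unfold pvMajors
      rw [List.filter_append, hrawc, List.nil_append]
      simp only [List.filter, show (c == c) = true by simp, List.map_cons,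
        List.map_nil, PySem.List.dedup_eq_ofList]
      exact PySem.Set.ofList_eq_self_of_nodup _ (by simp)
    have hrawn : ts.filter (fun t => t.1 == c && t.2.1 == m) = [] := by
      rw [List.filter_eq_nil_iff]
      intro t ht hsat
      simp only [Bool.and_eq_true, beq_iff_eq] at hsat
      have : t ∈ ts.filter (fun t => t.1 == c) := List.mem_filter.mpr ⟨ht, by simp [hsat.1]⟩
      rw [hrawc] at this; simp at this
    have hnames : pvNames (ts ++ [(c, m, n)]) c m = [n] := by
      unfold pvNames
      rw [List.filter_append, hrawn, List.nil_append]
      simp only [List.filter, show (c == c && m == m) = true by simp, List.map_cons,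
        List.map_nil, PySem.List.dedup_eq_ofList]
      exact PySem.Set.ofList_eq_self_of_nodup _ (by simp)
    rw [pvStepA_newcourse _ _ _ _ hcont]
    unfold pvRoster
    rw [hcourses]
    apply pvTab_insert_not_mem _ _ _ _ _ hc
    · intro c' hc'
      have hne : c' ≠ c := fun he => hc (he ▸ hc')
      rw [pvMajors_snoc_ne ts (c, m, n) c' hne]
      exact pvTab_congr _ _ _ (fun m' _ =>
        (pvNames_snoc_ne ts (c, m, n) c' m' (fun hp => hne hp.1)).symm)
    · rw [hmajors]
      apply PySem.Dict.ext
      rw [PySem.Dict.items_insert]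
      simp [pvTab, hnames, PySem.Dict.empty]

-- the fold of pvStepA over any triple stream produces the group-by roster
theorem pvFold_eq_roster (ts : List (String × String × String)) :
    ts.foldl (fun r t => pvStepA r t.2.2 t.2.1 t.1) PySem.Dict.empty = pvRoster ts := by
  induction ts using List.reverseRecOn with
  | nil => rfl
  | append_singleton ts t ih =>
    rw [List.foldl_append, List.foldl_cons, List.foldl_nil, ih, pvStep_snoc]

-- A's nested student/schedule loop is the fold of pvStepA over the flat triple stream
theorem pvFold_flatten (students : List (String × String × List String))
    (d : PySem.Dict String (PySem.Dict String (List String))) :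
    students.foldl (fun r s => s.2.2.foldl (fun r course => pvStepA r s.1 s.2.1 course) r) d =
      (pvTriples students).foldl (fun r t => pvStepA r t.2.2 t.2.1 t.1) d := by
  induction students generalizing d with
  | nil => rfl
  | cons s students ih =>
    simp only [List.foldl_cons, pvTriples, List.flatMap_cons, List.foldl_append, List.foldl_map]
    exact ih _

-- ===== VERDICT (by name: the statement is the Claim_ definition above) =====
theorem courseRosters_spec : Claim_equal_courseRosters := by
  intro students _
  unfold Spec_courseRosters courseRosters courseRosters_alt
  rw [pvFold_flatten, pvFold_eq_roster]
  simp only [pvRoster, pvCourses, pvMajors, pvNames, pvTab, pvTriples,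
    List.map_map, Function.comp_def]
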